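-- pv_equiv track=rewrite | github.com/xanthopoulakis/observablehq | kino/research/code/kino_random_simulations.py | prefix_hits
-- ===== SOURCE A (Python) =====
-- def prefix_hits(ticket_numbers: list[int], draw_set: set[int]) -> list[int]:
--     hits = [0]
--     running = 0
--     for number in ticket_numbers:
--         if number in draw_set:
--             running += 1
--         hits.append(running)
--     return hits
-- ===== SOURCE B (Python) =====
-- def prefix_hits(ticket_numbers: list[int], draw_set: set[int]) -> list[int]:
--     # Run-length construction: find the hit positions, then build the output as
--     # constant blocks between consecutive hit positions (value = hits so far).
--     pos = [i for i, n in enumerate(ticket_numbers) if n in draw_set]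
--     hits = []
--     prev = -1
--     for c, p in enumerate(pos):
--         hits.extend([c] * (p - prev))
--         prev = p
--     hits.extend([len(pos)] * (len(ticket_numbers) - prev))
--     return hits
-- ===== Notes on version B (the rewrite author's own statement) =====
-- stated objective: alternative
-- what changed: Instead of a per-element loop mutating a running counter, B first collects the hit positions and then builds the output by run-length construction: constant blocks [c]*(p-prev) between consecutive hit positions.
import Mathlib
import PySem

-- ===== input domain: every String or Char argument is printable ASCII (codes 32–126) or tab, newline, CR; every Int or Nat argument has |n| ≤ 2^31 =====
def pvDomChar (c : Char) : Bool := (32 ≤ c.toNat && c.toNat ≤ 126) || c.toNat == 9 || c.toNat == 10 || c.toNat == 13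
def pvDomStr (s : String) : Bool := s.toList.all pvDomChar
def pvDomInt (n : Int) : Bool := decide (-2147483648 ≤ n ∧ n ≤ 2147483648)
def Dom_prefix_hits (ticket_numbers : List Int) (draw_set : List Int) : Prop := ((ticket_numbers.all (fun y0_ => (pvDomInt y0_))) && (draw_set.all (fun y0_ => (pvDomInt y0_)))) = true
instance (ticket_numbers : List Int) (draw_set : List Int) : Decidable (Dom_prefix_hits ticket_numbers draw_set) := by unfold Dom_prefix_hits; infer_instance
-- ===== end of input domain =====

-- B replaces A's fused running-counter loop by a run-length construction from the list of hit positions (alternative algorithm, same cost). 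


-- ===== PORT A =====
-- hits = [0]; running = 0; for number: if number in draw_set: running += 1; hits.append(running)
def prefix_hits (ticket_numbers : List Int) (draw_set : List Int) : List Int :=
  (ticket_numbers.foldl
    (fun (st : List Int × Int) number =>
      let running := if draw_set.contains number then st.2 + 1 else st.2
      (st.1 ++ [running], running))
    ([0], 0)).1

-- ===== PORT B =====
-- pos = [i for i, n in enumerate(tn) if n in draw_set]; hits = []; prev = -1;
-- for c, p in enumerate(pos): hits.extend([c]*(p-prev)); prev = p; then final block of len(pos).
-- ((p - prev).toNat is exact: the run lengths are nonnegative in the Python loop)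
def prefix_hits_alt (ticket_numbers : List Int) (draw_set : List Int) : List Int :=
  let pos := ((ticket_numbers.zipIdx).filter (fun p => draw_set.contains p.1)).map
               (fun p => ((p.2 : Int)))
  let st := (pos.zipIdx).foldl
    (fun (st : List Int × Int) (q : Int × Nat) =>
      (st.1 ++ List.replicate (q.1 - st.2).toNat ((q.2 : Int)), q.1))
    ([], -1)
  st.1 ++ List.replicate (((ticket_numbers.length : Int)) - st.2).toNat ((pos.length : Int))

-- ===== PRECONDITION & SPEC =====
def Spec_prefix_hits (ticket_numbers : List Int) (draw_set : List Int) (out : List Int) : Prop := out = prefix_hits_alt ticket_numbers draw_set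
instance (ticket_numbers : List Int) (draw_set : List Int) (out : List Int) : Decidable (Spec_prefix_hits ticket_numbers draw_set out) := by unfold Spec_prefix_hits; infer_instance

-- ===== CLAIM (what is proved, stated in full; the proofs are below) =====
def Claim_equal_prefix_hits : Prop := ∀ (ticket_numbers : List Int) (draw_set : List Int), Dom_prefix_hits ticket_numbers draw_set → Spec_prefix_hits ticket_numbers draw_set (prefix_hits ticket_numbers draw_set)

-- ===== LEMMAS AND PROOFS =====
-- common reference: prefTail c bs = list of running counts after each element (c = count so far)
def prefTail : Nat → List Bool → List Int
  | _, [] => []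
  | c, b :: bs => let c' := if b then c + 1 else c
                  (c' : Int) :: prefTail c' bs

def pref (c : Nat) (bs : List Bool) : List Int := (c : Int) :: prefTail c bs

theorem foldA (ds : List Int) (tn : List Int) : ∀ (acc : List Int) (c : Nat),
    (tn.foldl
      (fun (st : List Int × Int) number =>
        let running := if ds.contains number then st.2 + 1 else st.2
        (st.1 ++ [running], running))
      (acc, (c : Int))).1
    = acc ++ prefTail c (tn.map (fun n => ds.contains n)) := by
  induction tn with
  | nil => intro acc c; simp [prefTail]
  | cons x xs ih =>
    intro acc c
    by_cases h : ds.contains x = true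
    · have : ((c : Int) + 1) = ((c + 1 : Nat) : Int) := by push_cast; ring
      simp only [List.foldl_cons, h, if_true, this, ih, List.map_cons, prefTail]
      simp
    · simp only [Bool.not_eq_true] at h
      simp only [List.foldl_cons, h, Bool.false_eq_true, if_false, ih, List.map_cons, prefTail]
      simp

theorem foldB (ds : List Int) (tn : List Int) :
    ∀ (b : Nat) (c0 : Nat) (acc : List Int) (prev : Int), prev ≤ (b : Int) - 1 →
    (let pos := ((tn.zipIdx b).filter (fun p => ds.contains p.1)).map (fun p => ((p.2 : Int)))
     let st := (pos.zipIdx c0).foldl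
       (fun (st : List Int × Int) (q : Int × Nat) =>
         (st.1 ++ List.replicate (q.1 - st.2).toNat ((q.2 : Int)), q.1))
       (acc, prev)
     st.1 ++ List.replicate (((b : Int) + tn.length) - st.2).toNat (((c0 + pos.length : Nat) : Int)))
    = acc ++ List.replicate (((b : Int) - 1) - prev).toNat (c0 : Int)
          ++ pref c0 (tn.map (fun n => ds.contains n)) := by
  induction tn with
  | nil =>
    intro b c0 acc prev hprev
    have hrep : ((b : Int) - prev).toNat = (((b : Int) - 1) - prev).toNat + 1 := by omega
    simp [pref, prefTail, hrep, List.replicate_succ']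
  | cons x xs ih =>
    intro b c0 acc prev hprev
    by_cases h : ds.contains x = true
    · have step := ih (b + 1) (c0 + 1) (acc ++ List.replicate ((b : Int) - prev).toNat (c0 : Int)) (b : Int) (by push_cast; omega)
      simp only [List.zipIdx_cons, List.filter_cons, h, if_true, List.map_cons, List.zipIdx_cons,
        List.foldl_cons] at step ⊢
      have hrep : ((b : Int) - prev).toNat = (((b : Int) - 1) - prev).toNat + 1 := by omega
      have harith : (((b : Nat) : Int) + 1 - 1 - (b : Int)).toNat = 0 := by omega
      have hcast : (((b + 1 : Nat)) : Int) = (b : Int) + 1 := by push_cast; ring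
      simp only [hcast] at step
      rw [show ((b:Int) + ((x :: xs).length : Int)) = ((b:Int) + 1 + (xs.length : Int)) by push_cast [List.length_cons]; ring]
      rw [show (c0 + (((x, b).2 : Int) :: List.map (fun p => ((p.2 : Int))) (List.filter (fun p => ds.contains p.1) (xs.zipIdx (b+1)))).length) = (c0 + 1 + (List.map (fun p => ((p.2 : Int))) (List.filter (fun p => ds.contains p.1) (xs.zipIdx (b+1)))).length) by simp; ring]
      rw [step]
      simp only [harith, List.replicate_zero, pref, prefTail, if_true]
      rw [hrep, List.replicate_succ']
      push_cast
      simp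
    · simp only [Bool.not_eq_true] at h
      have step := ih (b + 1) c0 acc prev (by push_cast; omega)
      simp only [List.zipIdx_cons, List.filter_cons, h, Bool.false_eq_true, if_false] at step ⊢
      have hcast : (((b + 1 : Nat)) : Int) = (b : Int) + 1 := by push_cast; ring
      simp only [hcast] at step
      rw [show ((b:Int) + ((x :: xs).length : Int)) = ((b:Int) + 1 + (xs.length : Int)) by push_cast [List.length_cons]; ring]
      rw [step]
      have hrep : ((b : Int) + 1 - 1 - prev).toNat = (((b : Int) - 1) - prev).toNat + 1 := by omega
      simp only [pref, prefTail, List.map_cons, h, Bool.false_eq_true, if_false]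
      rw [hrep, List.replicate_succ']
      simp

-- ===== VERDICT (by name: the statement is the Claim_ definition above) =====
theorem prefix_hits_spec : Claim_equal_prefix_hits := by
  intro tn ds _
  unfold Spec_prefix_hits prefix_hits prefix_hits_alt
  have hA := foldA ds tn [0] 0
  have hB := foldB ds tn 0 0 [] (-1) (by norm_num)
  simp only [Nat.cast_zero, zero_add] at hB
  simp only [Nat.cast_zero] at hA
  rw [hA]
  rw [show ((0:Int) - 1 - (-1)).toNat = 0 by omega] at hB
  simp only [List.replicate_zero, List.nil_append, List.append_nil] at hB
  have h0 : ([0] : List Int) ++ prefTail 0 (tn.map (fun n => ds.contains n))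
      = pref 0 (tn.map (fun n => ds.contains n)) := rfl
  rw [h0, ← hB]
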